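-- pv_equiv track=rewrite | github.com/vickxxx/shterm_client | Scripts/Loader/update.py | get_version_value
-- ===== SOURCE A (Python) =====
-- def get_version_value(ver):
--     if not ver:
--         return 0
--     val = 0
--     for x in map(lambda _: int(_), ver.split(r".")):
--         val += x
--         val *= 256
--     return val
-- ===== SOURCE B (Python) =====
-- def get_version_value(ver):
--     if not ver:
--         return 0
--     total = 0
--     weight = 256
--     for p in reversed(ver.split(".")):
--         total += int(p) * weight
--         weight *= 256
--     return total
-- ===== Notes on version B (the rewrite author's own statement) =====
-- stated objective: alternative
-- what changed: Replaces A's Horner fold ((val+x)*256 over the parts left-to-right) with a right-to-left pass over reversed parts that accumulates a growing power-of-256 weight and adds int(p)*weight, so no value is ever rescaled.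
import Mathlib
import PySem

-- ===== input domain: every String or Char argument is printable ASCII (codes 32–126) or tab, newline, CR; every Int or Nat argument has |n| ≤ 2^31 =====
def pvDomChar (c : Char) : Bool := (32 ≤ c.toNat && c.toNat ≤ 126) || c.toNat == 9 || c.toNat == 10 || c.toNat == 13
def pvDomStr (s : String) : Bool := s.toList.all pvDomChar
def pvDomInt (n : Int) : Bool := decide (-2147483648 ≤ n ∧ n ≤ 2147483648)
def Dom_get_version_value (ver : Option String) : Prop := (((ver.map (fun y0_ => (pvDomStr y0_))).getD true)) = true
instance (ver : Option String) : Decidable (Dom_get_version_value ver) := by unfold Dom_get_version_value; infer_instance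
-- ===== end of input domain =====

-- B replaces A's Horner fold with a right-to-left pass carrying a growing power-of-256 weight; same cost.

-- ===== PORT A =====
-- literal port of A: Horner-style fold (val + int(x)) * 256 over ver.split(".");
-- int(x) is PySem.Int.ofStr?; its none case (Python ValueError) is excluded by Pre_.
def get_version_value (ver : Option String) : Int :=
  match ver with
  | none => 0
  | some s =>
    if s = "" then 0
    else
      ((PySem.Str.split? s ".").getD []).foldl
        (fun val x => (val + (PySem.Int.ofStr? x).getD 0) * 256) 0

-- ===== PORT B =====
-- B-side helper: the reversed-order loop of Source B, state = (total, weight).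
def gvvRevLoop : List String → Int × Int → Int × Int
  | [], st => st
  | p :: rest, (total, weight) =>
      gvvRevLoop rest (total + (PySem.Int.ofStr? p).getD 0 * weight, weight * 256)

-- literal port of Source B: fold the reversed parts, adding int(p)*weight and growing the weight.
def get_version_value_alt (ver : Option String) : Int :=
  match ver with
  | none => 0
  | some s =>
    if s = "" then 0
    else
      (gvvRevLoop ((PySem.Str.split? s ".").getD []).reverse (0, 256)).1

-- ===== PRECONDITION & SPEC =====
-- Pre_ excludes exactly the inputs where Python's int() raises ValueError on some dot-separated part.
def Pre_get_version_value (ver : Option String) : Prop :=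
  match ver with
  | none => True
  | some s => s = "" ∨ ∀ p ∈ (PySem.Str.split? s ".").getD [], (PySem.Int.ofStr? p).isSome = true

instance (ver : Option String) : Decidable (Pre_get_version_value ver) := by
  unfold Pre_get_version_value; cases ver <;> infer_instance

def pvWitness_get_version_value : Option String := some "1.2.3"

def Spec_get_version_value (ver : Option String) (out : Int) : Prop := out = get_version_value_alt ver
instance (ver : Option String) (out : Int) : Decidable (Spec_get_version_value ver out) := by unfold Spec_get_version_value; infer_instance

-- ===== CLAIM (what is proved, stated in full; the proofs are below) =====
def Claim_equal_get_version_value : Prop := ∀ (ver : Option String), Dom_get_version_value ver → Pre_get_version_value ver → Spec_get_version_value ver (get_version_value ver)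

-- ===== LEMMAS AND PROOFS =====

-- the weight after the loop is the initial weight times 256^length
lemma gvvRevLoop_snd (l : List String) (v w : Int) :
    (gvvRevLoop l (v, w)).2 = w * 256 ^ l.length := by
  induction l generalizing v w with
  | nil => simp [gvvRevLoop]
  | cons p t ih => simp [gvvRevLoop, ih, pow_succ]; ring

-- A's Horner fold is additive modulo the 256^length factor
lemma horner_shift (l : List String) (acc : Int) :
    l.foldl (fun v x => (v + (PySem.Int.ofStr? x).getD 0) * 256) acc
      = acc * 256 ^ l.length + l.foldl (fun v x => (v + (PySem.Int.ofStr? x).getD 0) * 256) 0 := by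
  induction l generalizing acc with
  | nil => simp
  | cons x t ih =>
    simp only [List.foldl_cons, List.length_cons]
    rw [ih ((acc + (PySem.Int.ofStr? x).getD 0) * 256), ih ((0 + (PySem.Int.ofStr? x).getD 0) * 256),
      pow_succ]
    ring

-- key equality: Horner left-to-right = reversed weighted loop
lemma horner_eq_rev (l : List String) :
    l.foldl (fun v x => (v + (PySem.Int.ofStr? x).getD 0) * 256) 0
      = (gvvRevLoop l.reverse (0, 256)).1 := by
  induction l with
  | nil => simp [gvvRevLoop]
  | cons x t ih =>
    have hrev : (x :: t).reverse = t.reverse ++ [x] := by simp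
    have happ : ∀ (st : Int × Int),
        gvvRevLoop (t.reverse ++ [x]) st = gvvRevLoop [x] (gvvRevLoop t.reverse st) := by
      intro st
      induction t.reverse generalizing st with
      | nil => rfl
      | cons p r ihr => cases st with | mk a b => simp [gvvRevLoop, ihr]
    rw [List.foldl_cons, horner_shift, ih, hrev, happ]
    rcases h : gvvRevLoop t.reverse (0, 256) with ⟨tv, tw⟩
    have hw : tw = 256 * 256 ^ t.length := by
      have := gvvRevLoop_snd t.reverse 0 256
      rw [h] at this; simpa using this
    simp [gvvRevLoop, hw]
    ring

-- ===== VERDICT (by name: the statement is the Claim_ definition above) =====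
theorem get_version_value_spec : Claim_equal_get_version_value := by
  intro ver _ _
  unfold Spec_get_version_value get_version_value get_version_value_alt
  match ver with
  | none => rfl
  | some s =>
    by_cases hs : s = ""
    · simp [hs]
    · simp only [hs, if_false]
      exact horner_eq_rev _
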